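-- pv_equiv track=rewrite | github.com/kingbirdogd/AlgoChallenge | MaxSumOfRemovedKConnerItemsFromMatrixRow/solution.py | MaxSelectedKCornerItemItemFromArray
-- ===== SOURCE A (Python) =====
-- def MaxSelectedKCornerItemItemFromArray(v, remove_item):
--     windows_size = len(v) - remove_item
--     current_windows_size = 0
--     sum_all = 0
--     windows_sum = 0
--     min_windows_sum = 0
--     for i in range(0, len(v)):
--         sum_all += v[i]
--         windows_sum += v[i]
--         current_windows_size += 1
--         if current_windows_size == windows_size:
--             min_windows_sum = windows_sum
--         elif current_windows_size > windows_size: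
--             windows_sum -= v[i - windows_size]
--             if windows_sum < min_windows_sum:
--                 min_windows_sum = windows_sum
--     return sum_all - min_windows_sum
-- ===== SOURCE B (Python) =====
-- def MaxSelectedKCornerItemItemFromArray(v, remove_item):
--     prefix = [0]
--     for x in v:
--         prefix.append(prefix[-1] + x)
--     total = prefix[-1]
--     ws = len(v) - remove_item
--     windows = [prefix[e] - prefix[e - ws] for e in range(ws, len(v) + 1)]
--     return total - (min(windows) if windows else 0)
-- ===== Notes on version B (the rewrite author's own statement) =====
-- stated objective: alternative
-- what changed: Replaces the one-pass sliding-window loop (running window sum with conditional min updates) by a prefix-sum array and a minimum over all window sums computed as prefix differences.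
-- outside the precondition, e.g. on MaxSelectedKCornerItemItemFromArray([], 5): A returns 0, B raises IndexError
import Mathlib
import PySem

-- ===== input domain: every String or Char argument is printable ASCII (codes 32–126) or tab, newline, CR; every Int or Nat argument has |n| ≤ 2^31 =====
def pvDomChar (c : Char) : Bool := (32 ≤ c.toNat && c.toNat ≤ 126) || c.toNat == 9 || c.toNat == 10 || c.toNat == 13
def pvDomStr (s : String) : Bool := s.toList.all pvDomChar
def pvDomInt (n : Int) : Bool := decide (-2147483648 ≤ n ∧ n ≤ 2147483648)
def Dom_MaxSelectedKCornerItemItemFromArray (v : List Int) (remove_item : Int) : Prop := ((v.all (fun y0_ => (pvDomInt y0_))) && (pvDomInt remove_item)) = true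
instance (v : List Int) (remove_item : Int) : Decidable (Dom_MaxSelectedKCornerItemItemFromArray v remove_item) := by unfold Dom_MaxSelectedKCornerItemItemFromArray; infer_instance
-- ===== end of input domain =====

-- B replaces A's one-pass sliding window by a prefix-sum array and a minimum over all window sums (alternative decomposition, same cost).

-- ===== PORT A =====
def MaxSelectedKCornerItemItemFromArray (v : List Int) (remove_item : Int) : Int :=
  let ws : Int := (v.length : Int) - remove_item
  -- state = (sum_all, windows_sum, min_windows_sum, current_windows_size)
  let st := (PySem.List.pyRange 0 (v.length : Int) 1).foldl
    (fun (st : Int × Int × Int × Int) i =>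
      let sumAll := st.1 + PySem.List.pyGetD v i 0
      let winSum := st.2.1 + PySem.List.pyGetD v i 0
      let cur := st.2.2.2 + 1
      if cur = ws then (sumAll, winSum, winSum, cur)
      else if cur > ws then
        let winSum' := winSum - PySem.List.pyGetD v (i - ws) 0
        if winSum' < st.2.2.1 then (sumAll, winSum', winSum', cur)
        else (sumAll, winSum', st.2.2.1, cur)
      else (sumAll, winSum, st.2.2.1, cur))
    (0, 0, 0, 0)
  st.1 - st.2.2.1

-- ===== PORT B =====
def MaxSelectedKCornerItemItemFromArray_alt (v : List Int) (remove_item : Int) : Int :=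
  let pr := v.foldl (fun (p : List Int × Int) x => (p.1 ++ [p.2 + x], p.2 + x)) ([0], 0)
  let total := pr.2
  let ws : Int := (v.length : Int) - remove_item
  -- indices used by the comprehension are in range for every admitted input, so pyGetD's default is never used
  let windows := (PySem.List.pyRange ws ((v.length : Int) + 1) 1).map
    (fun e => PySem.List.pyGetD pr.1 e 0 - PySem.List.pyGetD pr.1 (e - ws) 0)
  total - (if windows.isEmpty then 0 else (PySem.List.min? windows (fun x => x)).getD 0)

-- ===== PRECONDITION & SPEC =====
-- Pre_ excludes remove_item > len(v) (removing more items than exist): there A raises IndexError for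
-- nonempty v, and for v = [] A's 0 is an accident of its empty loop while B's window indexing raises.
def Pre_MaxSelectedKCornerItemItemFromArray (v : List Int) (remove_item : Int) : Prop :=
  remove_item ≤ (v.length : Int)
instance (v : List Int) (remove_item : Int) : Decidable (Pre_MaxSelectedKCornerItemItemFromArray v remove_item) := by unfold Pre_MaxSelectedKCornerItemItemFromArray; infer_instance
def pvWitness_MaxSelectedKCornerItemItemFromArray : List Int × Int := ([3, -1, 4, -5, 2], 2)

def Spec_MaxSelectedKCornerItemItemFromArray (v : List Int) (remove_item : Int) (out : Int) : Prop := out = MaxSelectedKCornerItemItemFromArray_alt v remove_item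
instance (v : List Int) (remove_item : Int) (out : Int) : Decidable (Spec_MaxSelectedKCornerItemItemFromArray v remove_item out) := by unfold Spec_MaxSelectedKCornerItemItemFromArray; infer_instance

-- ===== CLAIM (what is proved, stated in full; the proofs are below) =====
def Claim_equal_MaxSelectedKCornerItemItemFromArray : Prop := ∀ (v : List Int) (remove_item : Int), Dom_MaxSelectedKCornerItemItemFromArray v remove_item → Pre_MaxSelectedKCornerItemItemFromArray v remove_item → Spec_MaxSelectedKCornerItemItemFromArray v remove_item (MaxSelectedKCornerItemItemFromArray v remove_item)

-- ===== LEMMAS AND PROOFS =====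

-- prefix sum of the first k elements
def pref (v : List Int) (k : Nat) : Int := (v.take k).sum

theorem pref_zero (v : List Int) : pref v 0 = 0 := rfl

theorem pref_len (v : List Int) : pref v v.length = v.sum := by simp [pref]

theorem pref_succ (v : List Int) (j : Nat) (h : j < v.length) :
    pref v (j + 1) = pref v j + v.getD j 0 := by
  unfold pref
  rw [List.getD_eq_getElem v 0 h]
  exact List.sum_take_succ v j h

theorem pref_cons (x : Int) (t : List Int) (k : Nat) :
    pref (x :: t) (k + 1) = x + pref t k := by
  simp [pref, List.take_succ_cons]

-- ---------- A side ----------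

-- the loop body of port A, named for the proofs
def stepA (v : List Int) (ws : Int) (st : Int × Int × Int × Int) (i : Int) : Int × Int × Int × Int :=
  let sumAll := st.1 + PySem.List.pyGetD v i 0
  let winSum := st.2.1 + PySem.List.pyGetD v i 0
  let cur := st.2.2.2 + 1
  if cur = ws then (sumAll, winSum, winSum, cur)
  else if cur > ws then
    let winSum' := winSum - PySem.List.pyGetD v (i - ws) 0
    if winSum' < st.2.2.1 then (sumAll, winSum', winSum', cur)
    else (sumAll, winSum', st.2.2.1, cur)
  else (sumAll, winSum, st.2.2.1, cur)

def foldA (v : List Int) (ws : Int) (j : Nat) : Int × Int × Int × Int :=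
  (PySem.List.pyRange 0 (j : Int) 1).foldl (stepA v ws) (0, 0, 0, 0)

theorem A_eq (v : List Int) (k : Int) :
    MaxSelectedKCornerItemItemFromArray v k
      = (foldA v ((v.length : Int) - k) v.length).1
        - (foldA v ((v.length : Int) - k) v.length).2.2.1 := rfl

theorem foldA_zero_steps (v : List Int) (ws : Int) : foldA v ws 0 = (0, 0, 0, 0) := by
  simp [foldA, PySem.List.pyRange_one_eq_nil]

theorem foldA_succ (v : List Int) (ws : Int) (j : Nat) :
    foldA v ws (j + 1) = stepA v ws (foldA v ws j) (j : Int) := by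
  unfold foldA
  rw [show ((j + 1 : Nat) : Int) = (j : Int) + 1 by push_cast; ring,
    PySem.List.pyRange_one_succ_right (by positivity), List.foldl_append]
  rfl

-- ws > n : neither branch ever fires
theorem foldA_big (v : List Int) (ws : Int) (hws : (v.length : Int) < ws) (j : Nat)
    (hj : j ≤ v.length) : foldA v ws j = (pref v j, pref v j, 0, (j : Int)) := by
  induction j with
  | zero => simp [foldA_zero_steps, pref_zero]
  | succ j ih =>
    rw [foldA_succ, ih (by omega)]
    unfold stepA
    have hj' : j < v.length := by omega
    have h1 : ¬ ((j : Int) + 1 = ws) := by omega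
    have h2 : ¬ ((j : Int) + 1 > ws) := by omega
    simp only [PySem.List.pyGetD_natCast, h1, h2, if_false]
    rw [pref_succ v j hj']
    simp

-- ws = 0 : the window sum is drained every step
theorem foldA_zero (v : List Int) (j : Nat) (hj : j ≤ v.length) :
    foldA v 0 j = (pref v j, 0, 0, (j : Int)) := by
  induction j with
  | zero => simp [foldA_zero_steps, pref_zero]
  | succ j ih =>
    rw [foldA_succ, ih (by omega)]
    unfold stepA
    have hj' : j < v.length := by omega
    have h1 : ¬ ((j : Int) + 1 = 0) := by omega
    have h2 : (j : Int) + 1 > 0 := by omega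
    simp only [PySem.List.pyGetD_natCast, h1, h2, if_false, if_pos, sub_zero]
    rw [pref_succ v j hj']
    simp

-- running minimum after j steps, window size w (1 ≤ w)
def Amin (v : List Int) (w j : Nat) : Int :=
  if j < w then 0
  else ((List.range (j - w)).map (fun s => pref v (s + 1 + w) - pref v (s + 1))).foldl min (pref v w)

theorem foldA_main (v : List Int) (w : Nat) (hw1 : 1 ≤ w) (_hw2 : w ≤ v.length) (j : Nat)
    (hj : j ≤ v.length) :
    foldA v (w : Int) j = (pref v j, pref v j - pref v (j - w), Amin v w j, (j : Int)) := by
  induction j with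
  | zero =>
    rw [foldA_zero_steps]
    simp [Amin, pref_zero, show 0 < w from hw1]
  | succ j ih =>
    rw [foldA_succ, ih (by omega)]
    unfold stepA
    have hj' : j < v.length := by omega
    have hps := pref_succ v j hj'
    rcases Nat.lt_trichotomy (j + 1) w with hlt | heq | hgt
    · have h1 : ¬ ((j : Int) + 1 = (w : Int)) := by omega
      have h2 : ¬ ((j : Int) + 1 > (w : Int)) := by omega
      have hA : Amin v w (j + 1) = Amin v w j := by
        simp only [Amin, if_pos (show j + 1 < w by omega), if_pos (show j < w by omega)]
      simp only [PySem.List.pyGetD_natCast, if_neg h1, if_neg h2, hA,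
        show j - w = 0 by omega, show j + 1 - w = 0 by omega, Prod.mk.injEq]
      refine ⟨by rw [hps], by rw [hps]; ring, by trivial, by push_cast; ring⟩
    · have h1 : ((j : Int) + 1 = (w : Int)) := by omega
      have hA : Amin v w (j + 1) = pref v w := by
        simp only [Amin, if_neg (show ¬ (j + 1 < w) by omega), show j + 1 - w = 0 by omega,
          List.range_zero, List.map_nil, List.foldl_nil]
      have hpw : pref v w = pref v (j + 1) := by rw [heq]
      simp only [PySem.List.pyGetD_natCast]
      rw [if_pos h1]
      simp only [show j - w = 0 by omega, show j + 1 - w = 0 by omega, hA, hpw, Prod.mk.injEq]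
      refine ⟨by rw [hps], by rw [hps]; ring, ?_, by push_cast; ring⟩
      rw [hps, pref_zero]; ring
    · have h1 : ¬ ((j : Int) + 1 = (w : Int)) := by omega
      have h2 : ((j : Int) + 1 > (w : Int)) := by omega
      have eidx : (j : Int) - (w : Int) = ((j - w : Nat) : Int) := by omega
      have hjw' : j - w < v.length := by omega
      have hget := pref_succ v (j - w) hjw'
      have e2 : j + 1 - w = (j - w) + 1 := by omega
      have eA : Amin v w (j + 1) = min (Amin v w j) (pref v (j + 1) - pref v (j - w + 1)) := by
        simp only [Amin, if_neg (show ¬ (j + 1 < w) by omega), if_neg (show ¬ (j < w) by omega),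
          e2, List.range_succ, List.map_append, List.foldl_append, List.map_cons, List.map_nil,
          List.foldl_cons, List.foldl_nil, show j - w + 1 + w = j + 1 by omega]
      simp only [PySem.List.pyGetD_natCast, if_neg h1, if_pos h2, eidx, e2, eA]
      split_ifs with hc <;>
      · simp only [Prod.mk.injEq]
        refine ⟨by rw [hps], by rw [hps, hget]; ring, ?_, by push_cast; ring⟩
        rw [hps, hget]
        omega

-- ---------- B side ----------

theorem Bpr_fold (v : List Int) (l0 : List Int) (s0 : Int) :
    v.foldl (fun (p : List Int × Int) x => (p.1 ++ [p.2 + x], p.2 + x)) (l0, s0)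
      = (l0 ++ (List.range v.length).map (fun j => s0 + pref v (j + 1)), s0 + v.sum) := by
  induction v generalizing l0 s0 with
  | nil => simp
  | cons x t ih =>
    simp only [List.foldl_cons]
    rw [ih]
    refine Prod.ext ?_ (by simp [List.sum_cons]; ring)
    simp only [List.length_cons, List.range_succ_eq_map, List.map_cons, List.map_map,
      pref_cons]
    simp only [List.append_assoc, List.cons_append, List.nil_append, pref_zero]
    refine congrArg (l0 ++ ·) ?_
    refine congrArg₂ (· :: ·) (by ring) ?_
    refine List.map_congr_left (fun s _ => ?_)
    simp; ring

theorem getD_pref (v : List Int) (i : Nat) (h : i ≤ v.length) :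
    ((List.range (v.length + 1)).map (pref v)).getD i 0 = pref v i := by
  rw [List.getD_eq_getElem?_getD]
  simp [List.getElem?_map, List.getElem?_range (by omega : i < v.length + 1)]

theorem B_prefix_list (v : List Int) :
    ([0] : List Int) ++ (List.range v.length).map (fun j => 0 + pref v (j + 1))
      = (List.range (v.length + 1)).map (pref v) := by
  simp only [List.range_succ_eq_map, List.map_cons, List.map_map]
  simp [pref_zero, Function.comp]

theorem B_big (v : List Int) (k : Int) (hk : k < 0) :
    MaxSelectedKCornerItemItemFromArray_alt v k = pref v v.length := by
  simp only [MaxSelectedKCornerItemItemFromArray_alt]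
  rw [Bpr_fold v [0] 0]
  rw [PySem.List.pyRange_one_eq_nil (by omega)]
  simp [pref_len]

theorem B_main (v : List Int) (k : Int) (w : Nat) (hw : w ≤ v.length)
    (hk : (v.length : Int) - k = (w : Int)) :
    MaxSelectedKCornerItemItemFromArray_alt v k
      = pref v v.length
        - (((List.range (v.length - w)).map (fun s => pref v (s + 1 + w) - pref v (s + 1))).foldl
            min (pref v w)) := by
  simp only [MaxSelectedKCornerItemItemFromArray_alt]
  rw [Bpr_fold v [0] 0, B_prefix_list v, hk]
  rw [PySem.List.pyRange_one, show (((v.length : Int) + 1) - (w : Int)).toNat = v.length - w + 1 by omega,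
    List.map_map]
  have hmap : ((List.range (v.length - w + 1)).map
        ((fun e => PySem.List.pyGetD ((List.range (v.length + 1)).map (pref v)) e 0
            - PySem.List.pyGetD ((List.range (v.length + 1)).map (pref v)) (e - (w : Int)) 0)
          ∘ (fun j : Nat => (w : Int) + j)))
      = (List.range (v.length - w + 1)).map (fun s => pref v (s + w) - pref v s) := by
    refine List.map_congr_left (fun s hs => ?_)
    have hs' : s < v.length - w + 1 := List.mem_range.mp hs
    simp only [Function.comp]
    rw [show (w : Int) + (s : Int) = ((s + w : Nat) : Int) by push_cast; ring]
    rw [show ((s + w : Nat) : Int) - (w : Int) = ((s : Nat) : Int) by push_cast; ring]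
    rw [PySem.List.pyGetD_natCast, PySem.List.pyGetD_natCast,
      getD_pref v (s + w) (by omega), getD_pref v s (by omega)]
  have hcons : (List.range (v.length - w + 1)).map (fun s => pref v (s + w) - pref v s)
      = (pref v w - pref v 0)
        :: (List.range (v.length - w)).map (fun s => pref v (s + 1 + w) - pref v (s + 1)) := by
    rw [List.range_succ_eq_map, List.map_cons, List.map_map]
    refine congrArg₂ (· :: ·) (by simp) ?_
    refine List.map_congr_left (fun s _ => ?_)
    simp [Nat.succ_eq_add_one]
  rw [hmap, hcons, PySem.List.min?_id_cons]
  simp [pref_zero, pref_len]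

theorem foldl_min_eq_self (l : List Int) (a : Int) (h : ∀ x ∈ l, a ≤ x) :
    l.foldl min a = a := by
  induction l generalizing a with
  | nil => rfl
  | cons x t ih =>
    have hax : min a x = a := by have := h x (by simp); omega
    simp only [List.foldl_cons, hax]
    exact ih a (fun y hy => h y (by simp [hy]))

-- ===== VERDICT (by name: the statement is the Claim_ definition above) =====
theorem MaxSelectedKCornerItemItemFromArray_spec : Claim_equal_MaxSelectedKCornerItemItemFromArray := by
  intro v k _ hpre
  unfold Spec_MaxSelectedKCornerItemItemFromArray
  unfold Pre_MaxSelectedKCornerItemItemFromArray at hpre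
  by_cases hneg : k < 0
  · -- window larger than the list: result is the whole sum
    rw [A_eq, foldA_big v _ (by omega) v.length (le_refl _), B_big v k hneg]
    simp
  · -- 0 ≤ k ≤ len v
    obtain ⟨w, hkw⟩ : ∃ w : Nat, (v.length : Int) - k = (w : Int) :=
      ⟨((v.length : Int) - k).toNat, by omega⟩
    have hw : w ≤ v.length := by omega
    by_cases hw0 : w = 0
    · subst hw0
      rw [A_eq, hkw, Nat.cast_zero, foldA_zero v v.length (le_refl _),
        B_main v k 0 (by omega) (by omega)]
      have hz : (((List.range (v.length - 0)).map
          (fun s => pref v (s + 1 + 0) - pref v (s + 1))).foldl min (pref v 0)) = 0 := by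
        rw [pref_zero]
        refine foldl_min_eq_self _ _ ?_
        intro x hx
        rcases List.mem_map.mp hx with ⟨s, _, rfl⟩
        simp
      rw [hz]
    · have hw1 : 1 ≤ w := by omega
      rw [A_eq, hkw, foldA_main v w hw1 hw v.length (le_refl _),
        B_main v k w hw hkw]
      simp only [Amin, if_neg (show ¬ (v.length < w) by omega)]
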